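-- pv_equiv track=rewrite | github.com/Richman-24/django_srf_t1 | task_1/dev.py | increaser
-- ===== SOURCE A (Python) =====
-- def increaser(n):
--     if n <= 0:
--         raise ValueError("Число должно быть > 0")
--
--     res = []
--     current = 1
--
--     while len(res) < n:
--         res.extend([current] * current)
--         current +=1
--
--     return res[:n]
-- ===== SOURCE B (Python) =====
-- import math
--
-- def increaser(n):
--     if n <= 0:
--         raise ValueError("Число должно быть > 0")
--     return [(math.isqrt(8 * p - 7) + 1) // 2 for p in range(1, n + 1)]
-- ===== Notes on version B (the rewrite author's own statement) =====
-- stated objective: alternative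
-- what changed: Replaced the extend-runs-then-truncate loop (build run k of k copies until long enough, then slice) by a direct per-position closed form: position p maps to (isqrt(8p-7)+1)//2, the integer triangular-number inversion, in a single comprehension; it trades the run-building loop for one isqrt per element.
import Mathlib
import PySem

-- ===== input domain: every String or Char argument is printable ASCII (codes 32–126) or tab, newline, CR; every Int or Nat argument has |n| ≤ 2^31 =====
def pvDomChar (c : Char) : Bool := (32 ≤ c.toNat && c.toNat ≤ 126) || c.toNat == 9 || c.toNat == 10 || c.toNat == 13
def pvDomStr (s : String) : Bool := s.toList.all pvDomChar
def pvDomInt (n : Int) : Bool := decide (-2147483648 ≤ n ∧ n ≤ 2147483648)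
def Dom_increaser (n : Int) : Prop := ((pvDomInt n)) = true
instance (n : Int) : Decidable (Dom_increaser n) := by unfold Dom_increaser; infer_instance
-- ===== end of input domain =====

-- B replaces A's extend-runs-then-truncate loop by the closed form value (isqrt(8p-7)+1)//2
-- at each position p; both raise ValueError for n <= 0 (excluded by Pre_).

-- ===== PORT A =====
-- while len(res) < n: res.extend([current]*current); current += 1
-- (fuel is a totality guard only: n.toNat iterations always suffice, each adds ≥ 1 element)
def increaserLoop (n : Int) : List Int → Int → Nat → List Int
  | res, _, 0 => res
  | res, current, fuel+1 =>
    if (res.length : Int) < n then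
      increaserLoop n (res ++ List.replicate current.toNat current) (current + 1) fuel
    else res

def increaser (n : Int) : List Int :=
  if n ≤ 0 then []  -- Python raises ValueError here; excluded by Pre_
  else PySem.List.slice (increaserLoop n [] 1 n.toNat) none (some n)

-- ===== PORT B =====
-- [(math.isqrt(8*p - 7) + 1) // 2 for p in range(1, n + 1)]
def increaser_alt (n : Int) : List Int :=
  if n ≤ 0 then []  -- Python raises ValueError here; excluded by Pre_
  else (PySem.List.pyRange 1 (n + 1) 1).map
    (fun p => PySem.Int.floordiv ((Nat.sqrt (8 * p - 7).toNat : Int) + 1) 2)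

-- ===== PRECONDITION & SPEC =====
-- A (and B) raise ValueError exactly when n ≤ 0.
def Pre_increaser (n : Int) : Prop := 1 ≤ n
instance (n : Int) : Decidable (Pre_increaser n) := by unfold Pre_increaser; infer_instance
def pvWitness_increaser : Int := (5)

def Spec_increaser (n : Int) (out : List Int) : Prop := out = increaser_alt n
instance (n : Int) (out : List Int) : Decidable (Spec_increaser n out) := by unfold Spec_increaser; infer_instance

-- ===== CLAIM (what is proved, stated in full; the proofs are below) =====
def Claim_equal_increaser : Prop := ∀ (n : Int), Dom_increaser n → Pre_increaser n → Spec_increaser n (increaser n)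

-- ===== LEMMAS AND PROOFS =====

-- the staircase prefix 1,2,2,3,3,3,... of the first m full runs
def S (m : Nat) : List Int := (List.range m).flatMap (fun k => List.replicate (k+1) ((k : Int)+1))

lemma S_succ (m : Nat) : S (m+1) = S m ++ List.replicate (m+1) ((m : Int)+1) := by
  simp [S, List.range_succ]

lemma length_S_succ (m : Nat) : (S (m+1)).length = (S m).length + (m+1) := by
  simp [S_succ]

lemma two_mul_length_S (m : Nat) : 2 * (S m).length = m * (m+1) := by
  induction m with
  | zero => simp [S]
  | succ m ih => rw [length_S_succ]; nlinarith

lemma length_S_mono (m j : Nat) (h : m ≤ j) : (S m).length ≤ (S j).length := by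
  induction j, h using Nat.le_induction with
  | base => exact le_refl _
  | succ j hmj ih => rw [length_S_succ]; omega

lemma length_S_ge (m : Nat) : m ≤ (S m).length := by
  induction m with
  | zero => simp
  | succ m ih => rw [length_S_succ]; omega

-- loop characterization: starting from a staircase prefix, the loop returns a staircase prefix
-- of length ≥ n, provided the fuel would suffice
lemma loop_eq (fuel : Nat) : ∀ (m : Nat) (n : Int),
    n ≤ ((S (m + fuel)).length : Int) →
    ∃ j, increaserLoop n (S m) ((m : Int)+1) fuel = S j ∧ n ≤ ((S j).length : Int) := by
  induction fuel with
  | zero => intro m n h; exact ⟨m, rfl, by simpa using h⟩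
  | succ fuel ih =>
    intro m n h
    rw [increaserLoop]
    split
    · have hrepl : List.replicate ((m : Int)+1).toNat ((m : Int)+1)
          = List.replicate (m+1) ((m : Int)+1) := by
        rw [show ((m : Int)+1).toNat = m+1 by omega]
      have hstep : S m ++ List.replicate ((m : Int)+1).toNat ((m : Int)+1) = S (m+1) := by
        rw [hrepl, S_succ]
      rw [hstep]
      have : ((m : Int)+1)+1 = ((m+1 : Nat) : Int)+1 := by push_cast; ring
      rw [this]
      have hshift : m + 1 + fuel = m + (fuel + 1) := by omega
      exact ih (m+1) n (by rw [hshift]; exact h)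
    · exact ⟨m, rfl, by omega⟩

-- the element in the last run of S (m+1)
lemma S_get_last (m i : Nat) (hlo : (S m).length ≤ i) (hhi : i < (S (m+1)).length) :
    (S (m+1))[i]? = some ((m : Int)+1) := by
  rw [S_succ, List.getElem?_append_right hlo]
  have : i - (S m).length < m+1 := by have := length_S_succ m; omega
  simp [this]

-- S m is a prefix of S j for m ≤ j (stated via getElem?)
lemma S_prefix_get (m j i : Nat) (h : m ≤ j) (hi : i < (S m).length) :
    (S j)[i]? = (S m)[i]? := by
  induction j, h using Nat.le_induction with
  | base => rfl
  | succ j hmj ih =>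
    have hij : i < (S j).length := lt_of_lt_of_le hi (length_S_mono m j hmj)
    rw [S_succ, List.getElem?_append_left hij, ih]

-- triangular inversion: for p ≥ 1, k = (isqrt(8p-7)+1)/2 satisfies T(k-1) < p ≤ T(k)
lemma inv_tri (p : Nat) (hp : 1 ≤ p) :
    1 ≤ (Nat.sqrt (8*p-7) + 1) / 2 ∧
    ((Nat.sqrt (8*p-7) + 1) / 2) * (((Nat.sqrt (8*p-7) + 1) / 2) - 1) < 2 * p ∧
    2 * p ≤ ((Nat.sqrt (8*p-7) + 1) / 2) * (((Nat.sqrt (8*p-7) + 1) / 2) + 1) := by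
  set s := Nat.sqrt (8*p-7) with hs
  set k := (s + 1) / 2 with hk
  have hsle : s * s ≤ 8*p-7 := by have := Nat.sqrt_le' (8*p-7); simpa [pow_two, hs] using this
  have hslt : 8*p-7 < (s+1) * (s+1) := by
    have := Nat.lt_succ_sqrt' (8*p-7); simpa [pow_two, hs, Nat.succ_eq_add_one] using this
  have h1 : s * s + 7 ≤ 8 * p := by omega
  have h2 : 8 * p < (s+1) * (s+1) + 7 := by omega
  have hs1 : 1 ≤ s := by
    rcases Nat.eq_zero_or_pos s with h0 | h; · exfalso; rw [h0] at h2; omega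
    · exact h
  have hk1 : 1 ≤ k := by omega
  obtain ⟨t, ht⟩ : ∃ t, k = t + 1 := ⟨k - 1, by omega⟩
  refine ⟨hk1, ?_, ?_⟩
  · -- s ∈ {2t+1, 2t+2} and s² + 7 ≤ 8p give k(k-1) < 2p
    have hcase : s = 2*t+1 ∨ s = 2*t+2 := by omega
    have hgoal : (t+1) * t < 2 * p := by
      rcases hcase with he | he <;> (rw [he] at h1; nlinarith)
    rw [ht]
    simpa using hgoal
  · -- s+1 ≤ 2k+1 gives 8p < (2k+1)²+7; evenness of k(k+1) finishes
    have hb : (s+1) * (s+1) ≤ (2*k+1) * (2*k+1) := Nat.mul_le_mul (by omega) (by omega)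
    have h3 : 8 * p < (2*k+1) * (2*k+1) + 7 := by omega
    obtain ⟨c, hc⟩ := Nat.even_mul_succ_self k
    have hsq : (2*k+1) * (2*k+1) = 4 * (k * (k+1)) + 1 := by ring
    rw [hc] at hsq
    rw [hc]
    omega

-- the value S puts at 0-based index i is exactly B's closed form at position i+1
lemma S_get_closed (j i : Nat) (hij : i < (S j).length) :
    (S j)[i]? = some ((((Nat.sqrt (8*(i+1)-7) + 1) / 2 : Nat) : Int)) := by
  obtain ⟨hk1, hlo, hhi⟩ := inv_tri (i+1) (by omega)
  set k := (Nat.sqrt (8*(i+1)-7) + 1) / 2 with hk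
  have l1 : 2 * (S (k-1)).length = k * (k-1) := by
    rw [two_mul_length_S, Nat.sub_add_cancel hk1, Nat.mul_comm]
  have hiSlo : (S (k-1)).length ≤ i := by
    have : 2 * (S (k-1)).length < 2 * (i+1) := l1 ▸ hlo
    omega
  have hiShi : i < (S k).length := by
    have : 2 * (i+1) ≤ 2 * (S k).length := by rw [two_mul_length_S]; exact hhi
    omega
  -- compare through S (max j k)
  have hjk : (S (max j k))[i]? = (S j)[i]? := S_prefix_get j (max j k) i (le_max_left _ _) hij
  have hkk : (S (max j k))[i]? = (S k)[i]? := S_prefix_get k (max j k) i (le_max_right _ _) hiShi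
  have hkval : (S k)[i]? = some ((k : Int)) := by
    have hkeq : k = (k-1) + 1 := by omega
    rw [hkeq] at hiShi ⊢
    rw [S_get_last (k-1) i hiSlo hiShi]
    all_goals exact congrArg some (by omega)
  rw [← hjk, hkk, hkval]

lemma B_component (i : Nat) (p : Int) (hp : p = 1 + (i : Int)) :
    PySem.Int.floordiv ((Nat.sqrt (8 * p - 7).toNat : Int) + 1) 2
      = (((Nat.sqrt (8*(i+1)-7) + 1) / 2 : Nat) : Int) := by
  subst hp
  have h : ((8 : Int) * (1 + (i : Int)) - 7).toNat = 8*(i+1)-7 := by omega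
  rw [h]
  have := PySem.Int.floordiv_natCast (Nat.sqrt (8*(i+1)-7) + 1) 2
  exact_mod_cast this

-- ===== VERDICT (by name: the statement is the Claim_ definition above) =====
theorem increaser_spec : Claim_equal_increaser := by
  intro n _ hpre
  unfold Spec_increaser increaser increaser_alt
  have hn : ¬ n ≤ 0 := by unfold Pre_increaser at hpre; omega
  rw [if_neg hn, if_neg hn]
  -- the loop result is a staircase prefix of length ≥ n
  have hfuel : n ≤ ((S (0 + n.toNat)).length : Int) := by
    rw [Nat.zero_add]
    have := length_S_ge n.toNat
    omega
  obtain ⟨j, hloop, hlen⟩ := loop_eq n.toNat 0 n hfuel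
  have hS0 : S 0 = ([] : List Int) := by simp [S]
  have hcast : ((0 : Nat) : Int) + 1 = (1 : Int) := by norm_num
  rw [hS0, hcast] at hloop
  rw [hloop]
  rw [PySem.List.slice_to _ (by omega : (0:Int) ≤ n)]
  -- compare elementwise
  apply List.ext_getElem?
  intro i
  by_cases hi : i < n.toNat
  · have hij : i < (S j).length := by omega
    rw [List.getElem?_take, if_pos hi, S_get_closed j i hij]
    rw [PySem.List.pyRange_one, List.map_map]
    have hlt : i < (n + 1 - 1).toNat := by omega
    rw [List.getElem?_map, List.getElem?_range (by omega : i < (n + 1 - 1).toNat)]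
    simp only [Option.map_some, Function.comp]
    rw [B_component i (1 + (i : Int)) rfl]
  · rw [List.getElem?_take, if_neg hi]
    symm
    rw [List.getElem?_eq_none_iff, List.length_map, PySem.List.length_pyRange_one]
    omega
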